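-- pv_equiv track=rewrite | github.com/Weihao-Jin/MetAbbreviate | src/Hybrid.py | abbre_pattern
-- ===== SOURCE A (Python) =====
-- def abbre_pattern(abbreviation: str):
--     pattern = 'w'
--     for ch in ['/', '\\', ',', '.', '-', '_', '&']:
--         if ch in abbreviation:
--             abbreviation = abbreviation.replace(ch, ' ')
--     for c in abbreviation:
--         if c == ' ':
--             pattern += ' '
--         elif c.isdigit() & (pattern[-1] in ['w', ' ']):
--             pattern += 'n'
--         elif not c.isdigit():
--             pattern += 'w'
--
--     return pattern[1:].replace(' ', '')
-- ===== SOURCE B (Python) =====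
-- def abbre_pattern(abbreviation: str):
--     seps = {'/', '\\', ',', '.', '-', '_', '&'}
--     out = []
--     i = 0
--     n = len(abbreviation)
--     while i < n:
--         c = abbreviation[i]
--         if c.isdigit():
--             j = i + 1
--             while j < n and abbreviation[j].isdigit():
--                 j += 1
--             out.append('n')
--             i = j
--         else:
--             if c != ' ' and c not in seps:
--                 out.append('w')
--             i += 1
--     return ''.join(out)
-- ===== Notes on version B (the rewrite author's own statement) =====
-- stated objective: idiomatic
-- what changed: B makes a single pass that skips each maximal digit run with an inner index advance, emitting one marker per run and one per other non-separator non-space character directly into a list, instead of A's seven preliminary replace() passes, a growing pattern string seeded with a sentinel and peeked at via pattern[-1], and a final slice-and-strip of spaces.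
import Mathlib
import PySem

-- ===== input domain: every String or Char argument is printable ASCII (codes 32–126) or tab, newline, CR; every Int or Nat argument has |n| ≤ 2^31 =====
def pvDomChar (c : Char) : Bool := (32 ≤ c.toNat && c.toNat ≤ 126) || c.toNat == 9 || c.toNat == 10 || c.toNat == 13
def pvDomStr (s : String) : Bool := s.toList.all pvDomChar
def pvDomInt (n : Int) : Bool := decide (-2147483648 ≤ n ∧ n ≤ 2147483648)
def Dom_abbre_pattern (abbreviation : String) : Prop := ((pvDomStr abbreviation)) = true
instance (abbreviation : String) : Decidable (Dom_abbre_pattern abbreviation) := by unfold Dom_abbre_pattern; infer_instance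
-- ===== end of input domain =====

-- B is a single pass that emits one marker per maximal digit run (skipping the run with an
-- inner advance) and one per other non-separator, non-space character, instead of A's replace()
-- passes, sentinel-seeded pattern string with a last-character peek, and final slice/strip
-- (objective: idiomatic).

-- ===== PORT A =====
-- the separator list A iterates over
def pvSeps : List Char := ['/', '\\', ',', '.', '-', '_', '&']

-- one iteration of A's first loop: if ch in abbreviation: abbreviation = abbreviation.replace(ch, ' ')
def pvReplStep (s : List Char) (ch : Char) : List Char :=
  if PySem.Chars.isIn [ch] s then PySem.Chars.replace s [ch] [' '] else s

-- pattern[-1] in ['w', ' ']  (pattern is never empty in A, so the none arm is unreachable)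
def pvLastIsWS (p : List Char) : Bool :=
  match PySem.List.pyGet? p (-1) with
  | some c => c = 'w' || c = ' '
  | none => false

-- the body of A's second loop
def pvStepA (p : List Char) (c : Char) : List Char :=
  if c = ' ' then p ++ [' ']
  else if PySem.Chars.isdigit c && pvLastIsWS p then p ++ ['n']
  else if !(PySem.Chars.isdigit c) then p ++ ['w']
  else p

def abbre_pattern (abbreviation : String) : String :=
  let abb := pvSeps.foldl pvReplStep abbreviation.toList
  let pattern := abb.foldl pvStepA ['w']
  String.ofList (PySem.Chars.replace (PySem.List.slice pattern (some 1) none) [' '] [])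

-- ===== PORT B =====
-- B's separator set
def pvSepsB : List Char := ['/', '\\', ',', '.', '-', '_', '&']

-- c != ' ' and c not in seps  (negated)
def pvSkip (c : Char) : Bool := c = ' ' || pvSepsB.contains c

-- B's while loop: on a digit, emit one 'n' and advance past the whole digit run;
-- otherwise emit 'w' unless the character is a space or separator.
def pvGoB : List Char → List Char
  | [] => []
  | c :: rest =>
    if PySem.Chars.isdigit c then
      'n' :: pvGoB (rest.dropWhile (fun x => PySem.Chars.isdigit x))
    else if pvSkip c then pvGoB rest
    else 'w' :: pvGoB rest
termination_by l => l.length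
decreasing_by
  · have := List.length_dropWhile_le (fun x => PySem.Chars.isdigit x) rest
    simp; omega
  all_goals simp

def abbre_pattern_alt (abbreviation : String) : String :=
  String.ofList (pvGoB abbreviation.toList)

-- ===== PRECONDITION & SPEC =====
def Spec_abbre_pattern (abbreviation : String) (out : String) : Prop := out = abbre_pattern_alt abbreviation
instance (abbreviation : String) (out : String) : Decidable (Spec_abbre_pattern abbreviation out) := by unfold Spec_abbre_pattern; infer_instance

-- ===== CLAIM (what is proved, stated in full; the proofs are below) =====
def Claim_equal_abbre_pattern : Prop := ∀ (abbreviation : String), Dom_abbre_pattern abbreviation → Spec_abbre_pattern abbreviation (abbre_pattern abbreviation)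

-- ===== LEMMAS AND PROOFS =====

-- substituting every separator by a space, as A's first loop does
def pvSub (c : Char) : Char := if c ∈ pvSeps then ' ' else c

-- the characters A's second loop appends, keyed by the last char appended so far
def pvEmit : Char → List Char → List Char
  | _, [] => []
  | last, c :: cs =>
    if c = ' ' then ' ' :: pvEmit ' ' cs
    else if PySem.Chars.isdigit c && (last = 'w' || last = ' ') then 'n' :: pvEmit 'n' cs
    else if !(PySem.Chars.isdigit c) then 'w' :: pvEmit 'w' cs
    else pvEmit last cs

theorem pvReplace_go_single (c : Char) (new : List Char) :
    ∀ (n : Nat) (l acc : List Char), l.length ≤ n →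
      PySem.Chars.replace.go [c] new n l acc
        = acc.reverse ++ l.flatMap (fun x => if x = c then new else [x]) := by
  intro n
  induction n with
  | zero => intro l acc h; cases l <;> simp_all [PySem.Chars.replace.go]
  | succ n ih =>
    intro l acc h
    cases l with
    | nil => simp [PySem.Chars.replace.go]
    | cons x t =>
      simp only [PySem.Chars.replace.go]
      by_cases hx : x = c
      · subst hx
        have hpre : List.isPrefixOf [x] (x :: t) = true := by
          simp [List.isPrefixOf]
        simp only [hpre, List.length_cons, List.length_nil, Nat.zero_add,
          List.drop_succ_cons, List.drop_zero]
        rw [ih t (new.reverse ++ acc) (by simp at h; omega)]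
        simp
      · have hpre : List.isPrefixOf [c] (x :: t) = false := by
          simp only [List.isPrefixOf, Bool.and_eq_false_iff]
          left
          simp [beq_eq_false_iff_ne]
          intro h'; exact hx h'.symm
        simp only [hpre]
        rw [ih t (x :: acc) (by simp at h; omega)]
        simp [hx]

theorem pvReplace_single (c : Char) (new l : List Char) :
    PySem.Chars.replace l [c] new
      = l.flatMap (fun x => if x = c then new else [x]) := by
  simp only [PySem.Chars.replace, List.isEmpty]
  rw [if_neg (by simp)]
  simpa using pvReplace_go_single c new l.length l [] le_rfl

theorem pvFlatMapSingle (ch d : Char) (l : List Char) :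
    l.flatMap (fun x => if x = ch then [d] else [x])
      = l.map (fun x => if x = ch then d else x) := by
  induction l with
  | nil => rfl
  | cons x t ih => by_cases hx : x = ch <;> simp [hx, ih]

theorem pvReplStep_eq (l : List Char) (ch : Char) :
    pvReplStep l ch = l.map (fun x => if x = ch then ' ' else x) := by
  unfold pvReplStep
  by_cases h : PySem.Chars.isIn [ch] l = true
  · rw [if_pos h, pvReplace_single, pvFlatMapSingle]
  · rw [if_neg h]
    have hmem : ch ∉ l := fun hm =>
      h ((PySem.Chars.isIn_iff_infix [ch] l).mpr ((List.singleton_infix_iff ch l).mpr hm))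
    clear h
    induction l with
    | nil => rfl
    | cons x t ih =>
      simp only [List.mem_cons, not_or] at hmem
      simp only [List.map_cons, if_neg (fun h' : x = ch => hmem.1 h'.symm)]
      rw [← ih hmem.2]

set_option maxHeartbeats 1000000 in
theorem pvRepl_eq_map (l : List Char) :
    pvSeps.foldl pvReplStep l = l.map pvSub := by
  simp only [pvSeps, List.foldl_cons, List.foldl_nil, pvReplStep_eq, List.map_map]
  apply List.map_congr_left
  intro x _
  simp only [Function.comp]
  by_cases h : x ∈ pvSeps
  · fin_cases h <;> rfl
  · simp only [pvSeps, List.mem_cons, List.not_mem_nil, or_false, not_or] at h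
    obtain ⟨h1, h2, h3, h4, h5, h6, h7⟩ := h
    simp [pvSub, pvSeps, h1, h2, h3, h4, h5, h6, h7]

theorem pvLastIsWS_append (p : List Char) (last : Char) :
    pvLastIsWS (p ++ [last]) = (decide (last = 'w') || decide (last = ' ')) := by
  unfold pvLastIsWS
  rw [PySem.List.pyGet?_neg_one_append_singleton]

theorem pvStepA_append (p : List Char) (last c : Char) :
    pvStepA (p ++ [last]) c =
      if c = ' ' then (p ++ [last]) ++ [' ']
      else if (PySem.Chars.isdigit c && (decide (last = 'w') || decide (last = ' '))) = true then
        (p ++ [last]) ++ ['n']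
      else if (!PySem.Chars.isdigit c) = true then (p ++ [last]) ++ ['w']
      else (p ++ [last]) := by
  unfold pvStepA
  rw [pvLastIsWS_append]

theorem pvFoldlA (l : List Char) : ∀ (p : List Char) (last : Char),
    List.foldl pvStepA (p ++ [last]) l = (p ++ [last]) ++ pvEmit last l := by
  induction l with
  | nil => intro p last; simp [pvEmit]
  | cons c cs ih =>
    intro p last
    simp only [List.foldl_cons, pvEmit, pvStepA_append]
    by_cases hc : c = ' '
    · simp only [if_pos hc]
      rw [ih (p ++ [last]) ' ']
      simp
    · simp only [if_neg hc]
      by_cases hb : (PySem.Chars.isdigit c && (decide (last = 'w') || decide (last = ' '))) = true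
      · simp only [if_pos hb]
        rw [ih (p ++ [last]) 'n']
        simp
      · simp only [if_neg hb]
        by_cases hd : PySem.Chars.isdigit c = true
        · simp only [hd, Bool.not_true, Bool.false_eq_true, if_false]
          rw [ih p last]
        · simp only [Bool.not_eq_true] at hd
          simp only [hd, Bool.not_false, if_true]
          rw [ih (p ++ [last]) 'w']
          simp

theorem pvEmit_space (l : List Char) :
    pvEmit ' ' l = pvEmit 'w' l := by
  cases l with
  | nil => rfl
  | cons c cs =>
    by_cases hc : c = ' '
    · simp [pvEmit, hc]
    · cases hd : PySem.Chars.isdigit c <;> simp [pvEmit, hc, hd]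

theorem pvEmit_n (l : List Char) :
    pvEmit 'n' l = pvEmit 'w' (l.dropWhile (fun x => PySem.Chars.isdigit x)) := by
  induction l with
  | nil => rfl
  | cons c cs ih =>
    by_cases hd : PySem.Chars.isdigit c = true
    · have hc : c ≠ ' ' := by
        intro h; rw [h] at hd; exact absurd hd (by decide)
      simp [pvEmit, hc, hd, ih]
    · simp only [Bool.not_eq_true] at hd
      by_cases hc : c = ' '
      · subst hc; simp [pvEmit, hd]
      · simp [pvEmit, hc, hd]

theorem pvSub_isdigit (x : Char) :
    PySem.Chars.isdigit (pvSub x) = PySem.Chars.isdigit x := by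
  unfold pvSub
  by_cases h : x ∈ pvSeps
  · rw [if_pos h]; fin_cases h <;> rfl
  · rw [if_neg h]

theorem pvSub_of_digit (x : Char) (hd : PySem.Chars.isdigit x = true) : pvSub x = x := by
  unfold pvSub
  by_cases h : x ∈ pvSeps
  · exfalso; fin_cases h <;> exact absurd hd (by decide)
  · rw [if_neg h]

theorem pvMain (l : List Char) :
    (pvEmit 'w' (l.map pvSub)).flatMap (fun x => if x = ' ' then [] else [x]) = pvGoB l := by
  induction l using pvGoB.induct with
  | case1 => simp [pvEmit, pvGoB]
  | case2 c rest hd ih =>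
    have hc : c ≠ ' ' := by
      intro h; rw [h] at hd; exact absurd hd (by decide)
    rw [List.map_cons, pvSub_of_digit c hd]
    have hcomp : ((fun x => PySem.Chars.isdigit x) ∘ pvSub) = (fun x => PySem.Chars.isdigit x) := by
      funext x; simp [Function.comp, pvSub_isdigit]
    rw [show pvEmit 'w' (c :: rest.map pvSub) = 'n' :: pvEmit 'n' (rest.map pvSub) from by
      simp [pvEmit, hc, hd]]
    rw [pvEmit_n, List.dropWhile_map, hcomp]
    simp only [List.flatMap_cons]
    rw [ih]
    simp [pvGoB, hd]
  | case3 c rest hd hskip ih =>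
    have hsub : pvSub c = ' ' := by
      unfold pvSkip at hskip
      unfold pvSub
      by_cases h : c ∈ pvSeps
      · rw [if_pos h]
      · have hc : c = ' ' := by
          simp only [Bool.or_eq_true, decide_eq_true_eq] at hskip
          rcases hskip with h' | h'
          · exact h'
          · exact absurd (by simpa using h') h
        rw [if_neg h, hc]
    rw [List.map_cons, hsub]
    rw [show pvEmit 'w' (' ' :: rest.map pvSub) = ' ' :: pvEmit ' ' (rest.map pvSub) from by
      simp [pvEmit]]
    rw [pvEmit_space]
    simpa [pvGoB, hd, hskip] using ih
  | case4 c rest hd hskip ih =>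
    have hnm : c ∉ pvSeps := by
      intro h; unfold pvSkip at hskip
      simp only [pvSeps, List.mem_cons, List.not_mem_nil, or_false] at h
      simp only [pvSepsB] at hskip
      rcases h with h|h|h|h|h|h|h <;> simp [h] at hskip
    have hc : c ≠ ' ' := by
      intro h; unfold pvSkip at hskip; simp [h] at hskip
    simp only [Bool.not_eq_true] at hd
    rw [List.map_cons, show pvSub c = c from by unfold pvSub; rw [if_neg hnm]]
    rw [show pvEmit 'w' (c :: rest.map pvSub) = 'w' :: pvEmit 'w' (rest.map pvSub) from by
      simp [pvEmit, hc, hd]]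
    simp only [List.flatMap_cons]
    rw [ih]
    simp [pvGoB, hd, hskip]

-- ===== VERDICT (by name: the statement is the Claim_ definition above) =====
theorem abbre_pattern_spec : Claim_equal_abbre_pattern := by
  intro s _
  unfold Spec_abbre_pattern abbre_pattern abbre_pattern_alt
  dsimp only
  rw [pvRepl_eq_map]
  have h1 := pvFoldlA (s.toList.map pvSub) [] 'w'
  simp only [List.nil_append] at h1
  rw [h1, List.singleton_append, PySem.List.slice_from_one, List.tail_cons,
    pvReplace_single, pvMain]
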